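-- pv_equiv track=rewrite | github.com/odormond/adventofcode | 2023/15/fifteen.py | part2
-- ===== SOURCE A (Python) =====
-- def parse(data):
--     return data.replace('\n', '').split(',')
--
-- def HASH(string):
--     h = 0
--     for c in string:
--         h += ord(c)
--         h *= 17
--         h %= 256
--     return h
--
-- def part2(data):
--     boxes = [{} for i in range(256)]
--     for instruction in parse(data):
--         if '=' in instruction:
--             op = '='
--             label, arg = instruction.split('=')
--             box = HASH(label)
--             boxes[box][label] = int(arg)
--         else:
--             op = '-'
--             label, arg = instruction.split('-')
--             box = HASH(label)
--             if label in boxes[box]: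
--                 boxes[box].pop(label)
--     return sum(
--         i * j * f
--         for i, box in enumerate(boxes, 1)
--         for j, f in enumerate(box.values(), 1)
--     )
-- ===== SOURCE B (Python) =====
-- def HASH(string):
--     h = 0
--     for c in string:
--         h = (h + ord(c)) * 17 % 256
--     return h
--
-- def part2(data):
--     # One pass computes, per label, its last written value and the time it entered
--     # its current slot; the boxes are only reconstructed at the end from timestamps.
--     last_val = {}
--     since = {}  # label -> index of the instruction that put it in its current slot
--     for t, token in enumerate(data.replace('\n', '').split(',')):
--         if '=' in token:
--             label, arg = token.split('=')
--             last_val[label] = int(arg)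
--             if label not in since:
--                 since[label] = t
--         else:
--             label, _ = token.split('-')
--             since.pop(label, None)
--     buckets = [[] for _ in range(256)]
--     for label, t in since.items():
--         buckets[HASH(label)].append((t, label))
--     total = 0
--     for b, bucket in enumerate(buckets, 1):
--         bucket.sort(key=lambda p: p[0])
--         for s, (_, label) in enumerate(bucket, 1):
--             total += b * s * last_val[label]
--     return total
-- ===== Notes on version B (the rewrite author's own statement) =====
-- stated objective: alternative
-- what changed: Instead of simulating 256 ordered boxes, B makes one pass recording per label only its last written value and the timestamp at which it entered its current slot (reset on '-'), then reconstructs each box at the end by bucketing the surviving labels by hash and sorting them by timestamp.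
import Mathlib
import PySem

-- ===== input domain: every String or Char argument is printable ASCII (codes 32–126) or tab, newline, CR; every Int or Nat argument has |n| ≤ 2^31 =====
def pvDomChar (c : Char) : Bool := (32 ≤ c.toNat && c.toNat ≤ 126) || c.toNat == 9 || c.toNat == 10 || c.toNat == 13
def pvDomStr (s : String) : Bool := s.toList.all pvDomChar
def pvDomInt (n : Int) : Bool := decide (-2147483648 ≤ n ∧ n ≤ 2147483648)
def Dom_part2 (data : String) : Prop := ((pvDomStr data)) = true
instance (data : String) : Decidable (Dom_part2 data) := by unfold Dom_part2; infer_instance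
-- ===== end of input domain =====

-- B replaces A's 256-box simulation by a single pass that records, per label, the last
-- written value and the time it entered its current slot, then rebuilds the boxes once
-- at the end by bucketing surviving labels by hash and sorting by that timestamp.

-- s.split(sep) with a non-empty separator (never raises there)
def pySplit (s sep : String) : List String := (PySem.Str.split? s sep).getD []

-- ===== PORT A =====
def parseA (data : String) : List String :=
  pySplit (PySem.Str.replace data "\n" "") ","

def hashA (s : String) : Int :=
  s.toList.foldl (fun h c =>
    let h := h + (c.toNat : Int)
    let h := h * 17
    let h := PySem.Int.mod h 256
    h) 0

def stepA (boxes : List (PySem.Dict String Int)) (instruction : String) :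
    List (PySem.Dict String Int) :=
  if PySem.Str.isIn "=" instruction then
    let parts := pySplit instruction "="
    let label := parts.getD 0 ""
    let arg := parts.getD 1 ""
    let box := hashA label
    boxes.set box.toNat
      ((PySem.List.pyGetD boxes box PySem.Dict.empty).insert label
        ((PySem.Int.ofStr? arg).getD 0))
  else
    let parts := pySplit instruction "-"
    let label := parts.getD 0 ""
    let box := hashA label
    if (PySem.List.pyGetD boxes box PySem.Dict.empty).contains label then
      boxes.set box.toNat ((PySem.List.pyGetD boxes box PySem.Dict.empty).erase label)
    else
      boxes

def part2 (data : String) : Int :=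
  let boxes := (PySem.List.pyRange 0 256 1).map
    (fun _ => (PySem.Dict.empty : PySem.Dict String Int))
  let boxes := (parseA data).foldl stepA boxes
  ((PySem.List.enumerate boxes 1).flatMap (fun p =>
    (PySem.List.enumerate (PySem.Dict.values p.2) 1).map (fun q => p.1 * q.1 * q.2))).sum

-- ===== PORT B =====
def hashB (s : String) : Int :=
  s.toList.foldl (fun h c => PySem.Int.mod ((h + (c.toNat : Int)) * 17) 256) 0

-- the single pass of Source B: state = (last_val, since)
def stepB (st : PySem.Dict String Int × PySem.Dict String Int) (p : Int × String) :
    PySem.Dict String Int × PySem.Dict String Int :=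
  if PySem.Str.isIn "=" p.2 then
    let parts := pySplit p.2 "="
    let label := parts.getD 0 ""
    let v := (PySem.Int.ofStr? (parts.getD 1 "")).getD 0
    (st.1.insert label v,
     if st.2.contains label then st.2 else st.2.insert label p.1)
  else
    let label := (pySplit p.2 "-").getD 0 ""
    (st.1, st.2.erase label)

def part2_alt (data : String) : Int :=
  let tokens := pySplit (PySem.Str.replace data "\n" "") ","
  let st := (PySem.List.enumerate tokens 0).foldl stepB
    ((PySem.Dict.empty : PySem.Dict String Int), (PySem.Dict.empty : PySem.Dict String Int))
  let buckets := st.2.items.foldl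
    (fun bs p => bs.set (hashB p.1).toNat
      (PySem.List.pyGetD bs (hashB p.1) [] ++ [(p.2, p.1)]))
    ((PySem.List.pyRange 0 256 1).map (fun _ => ([] : List (Int × String))))
  (PySem.List.enumerate buckets 1).foldl (fun tot q =>
    (PySem.List.enumerate (PySem.List.sorted q.2 Prod.fst false) 1).foldl
      (fun tot r => tot + q.1 * r.1 * st.1.getD r.2.2 0) tot) 0

-- ===== PRECONDITION & SPEC =====
-- Pre_ excludes exactly the inputs on which the Python A raises (and B raises too): a
-- token that does not contain exactly one equals sign nor, failing that, exactly one dash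
-- (tuple-unpack ValueError), or an assignment token whose argument int() rejects.
def Pre_part2 (data : String) : Prop :=
  ∀ t ∈ pySplit (PySem.Str.replace data "\n" "") ",",
    (PySem.Str.count t "=" = 1 ∧
      (PySem.Int.ofStr? ((pySplit t "=").getD 1 "")).isSome = true) ∨
    (PySem.Str.count t "=" = 0 ∧ PySem.Str.count t "-" = 1)
instance (data : String) : Decidable (Pre_part2 data) := by unfold Pre_part2; infer_instance

def pvWitness_part2 : String := "rn=1,cm-,qp=3,cm=2,qp-,pc=4"

def Spec_part2 (data : String) (out : Int) : Prop := out = part2_alt data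
instance (data : String) (out : Int) : Decidable (Spec_part2 data out) := by unfold Spec_part2; infer_instance

-- ===== CLAIM (what is proved, stated in full; the proofs are below) =====
def Claim_equal_part2 : Prop := ∀ (data : String), Dom_part2 data → Pre_part2 data → Spec_part2 data (part2 data)

-- ===== LEMMAS AND PROOFS =====

theorem hashB_eq_hashA (s : String) : hashB s = hashA s := rfl

theorem hash_bounds_aux (cs : List Char) (h : Int) (hh : 0 ≤ h ∧ h < 256) :
    0 ≤ cs.foldl (fun h c =>
      let h := h + (c.toNat : Int)
      let h := h * 17
      let h := PySem.Int.mod h 256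
      h) h ∧ cs.foldl (fun h c =>
      let h := h + (c.toNat : Int)
      let h := h * 17
      let h := PySem.Int.mod h 256
      h) h < 256 := by
  induction cs generalizing h with
  | nil => exact hh
  | cons c cs ih =>
      exact ih _ ⟨PySem.Int.mod_nonneg _ (by norm_num), PySem.Int.mod_lt _ (by norm_num)⟩

theorem hash_bounds (s : String) : 0 ≤ hashA s ∧ hashA s < 256 :=
  hash_bounds_aux s.toList 0 ⟨le_rfl, by norm_num⟩

theorem getD_set_self' {α : Type} (l : List α) (i : Nat) (v d : α) (h : i < l.length) :
    (l.set i v).getD i d = v := by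
  rw [List.getD_eq_getElem _ _ (by simpa using h)]
  exact List.getElem_set_self (by simpa using h)

theorem getD_set_ne' {α : Type} (l : List α) (i j : Nat) (v d : α) (h : j ≠ i) :
    (l.set i v).getD j d = l.getD j d := by
  simp [List.getD_eq_getElem?_getD, List.getElem?_set_ne (by omega : i ≠ j)]

theorem contains_of_items_filter (since lv : PySem.Dict String Int)
    (dbox : PySem.Dict String Int) (label : String)
    (heq : dbox.items = (since.items.filter (fun p => hashA p.1 == hashA label)).map
      (fun p => (p.1, lv.getD p.1 0))) :
    dbox.contains label = since.contains label := by
  have hpt : ∀ p : String × Int,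
      ((hashA p.1 == hashA label) && (p.1 == label)) = (p.1 == label) := by
    intro p; by_cases h : p.1 = label <;> simp [h]
  simp only [PySem.Dict.contains, heq, List.any_map, List.any_filter, Function.comp]
  simp only [hpt]

theorem fst_ne_of_not_contains (d : PySem.Dict String Int) (label : String)
    (h : d.contains label = false) : ∀ p ∈ d.items, p.1 ≠ label := by
  intro p hp hpl
  have := List.any_eq_false.mp h p hp
  simp [hpl] at this

theorem filter_hash_of_erase (items : List (String × Int)) (label : String) (h : Int)
    (hne : hashA label ≠ h) :
    (items.filter (fun p => !(p.1 == label))).filter (fun p => hashA p.1 == h) =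
      items.filter (fun p => hashA p.1 == h) := by
  rw [List.filter_filter]
  refine List.filter_congr (fun p _ => ?_)
  by_cases hpl : p.1 = label
  · simp [hpl, hne]
  · simp [hpl]

-- the coupling invariant between A's boxes and B's (last_val, since) after any prefix;
-- t is the index of the next instruction
def InvAB (a : List (PySem.Dict String Int)) (lv since : PySem.Dict String Int) (t : Int) : Prop :=
  a.length = 256 ∧
  (∀ d ∈ a, d.keys.Nodup) ∧
  since.keys.Nodup ∧
  (since.items.map Prod.snd).Pairwise (· < ·) ∧
  (∀ p ∈ since.items, p.2 < t) ∧
  (∀ h : Nat, h < 256 →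
    (a.getD h PySem.Dict.empty).items =
      (since.items.filter (fun p => hashA p.1 == (h : Int))).map
        (fun p => (p.1, lv.getD p.1 0)))

theorem step_inv (a : List (PySem.Dict String Int)) (lv since : PySem.Dict String Int)
    (t : Int) (tok : String) (hinv : InvAB a lv since t) :
    InvAB (stepA a tok) (stepB (lv, since) (t, tok)).1 (stepB (lv, since) (t, tok)).2 (t + 1) := by
  obtain ⟨hlen, hnodA, hnodS, hpw, hbnd, hitems⟩ := hinv
  by_cases hop : PySem.Str.isIn "=" tok = true
  · -- '=' instruction
    simp only [stepA, stepB, hop, if_pos]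
    set label := (pySplit tok "=").getD 0 "" with hlabel
    set v := (PySem.Int.ofStr? ((pySplit tok "=").getD 1 "")).getD 0 with hvdef
    obtain ⟨hb0, hb1⟩ := hash_bounds label
    have hblt : (hashA label).toNat < a.length := by omega
    rw [PySem.List.pyGetD_of_nonneg _ _ hb0]
    set dbox := a.getD (hashA label).toNat PySem.Dict.empty with hdb
    have hdmem : dbox ∈ a := by
      rw [hdb, List.getD_eq_getElem _ _ hblt]; exact List.getElem_mem _
    have hdnod : dbox.keys.Nodup := hnodA _ hdmem
    have hitemsb : dbox.items =
        (since.items.filter (fun p => hashA p.1 == hashA label)).map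
          (fun p => (p.1, lv.getD p.1 0)) := by
      have := hitems (hashA label).toNat (by omega)
      rwa [Int.toNat_of_nonneg hb0] at this
    have hcont : dbox.contains label = since.contains label :=
      contains_of_items_filter since lv dbox label hitemsb
    refine ⟨by simp [hlen], ?_, ?_, ?_, ?_, ?_⟩
    · intro d hd
      rcases List.mem_or_eq_of_mem_set hd with h1 | h2
      · exact hnodA d h1
      · exact h2 ▸ PySem.Dict.nodup_keys_insert _ _ _ hdnod
    · by_cases hc : since.contains label = true
      · simpa [hc] using hnodS
      · simp only [hc, if_neg, Bool.false_eq_true, not_false_iff]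
        exact PySem.Dict.nodup_keys_insert _ _ _ hnodS
    · by_cases hc : since.contains label = true
      · simpa [hc] using hpw
      · simp only [hc, if_neg, Bool.false_eq_true, not_false_iff]
        rw [PySem.Dict.items_insert_of_not_contains _ _ (by simpa using hc)]
        rw [List.map_append, List.pairwise_append]
        exact ⟨hpw, by simp, by
          simp only [List.map_cons, List.map_nil, List.mem_singleton, List.mem_map]
          rintro s ⟨p, hp, rfl⟩ b rfl
          exact hbnd p hp⟩
    · by_cases hc : since.contains label = true
      · simp only [hc, if_pos]
        exact fun p hp => lt_trans (hbnd p hp) (by omega)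
      · simp only [hc, if_neg, Bool.false_eq_true, not_false_iff]
        rw [PySem.Dict.items_insert_of_not_contains _ _ (by simpa using hc)]
        intro p hp
        rcases List.mem_append.mp hp with h1 | h2
        · exact lt_trans (hbnd p h1) (by omega)
        · simp only [List.mem_singleton] at h2; subst h2; show t < t + 1; omega
    · intro h hlt
      by_cases hcase : h = (hashA label).toNat
      · subst hcase
        rw [getD_set_self' _ _ _ _ hblt, Int.toNat_of_nonneg hb0]
        by_cases hc : since.contains label = true
        · have hdc : dbox.contains label = true := by rw [hcont]; exact hc
          simp only [hc, if_pos]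
          rw [PySem.Dict.items_insert_of_contains _ _ hdc, hitemsb, List.map_map]
          refine List.map_congr_left (fun p hp => ?_)
          by_cases hpl : p.1 = label
          · simp [Function.comp, hpl]
          · simp [Function.comp, hpl, PySem.Dict.getD_insert]
        · have hdc : dbox.contains label = false := by
            rw [hcont]; simpa using hc
          have hsc : since.contains label = false := by simpa using hc
          simp only [hc, if_neg, Bool.false_eq_true, not_false_iff]
          rw [PySem.Dict.items_insert_of_not_contains _ _ hdc,
            PySem.Dict.items_insert_of_not_contains _ _ hsc,
            List.filter_append, List.map_append, hitemsb]
          have hnotin := fst_ne_of_not_contains since label hsc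
          congr 1
          · refine List.map_congr_left (fun p hp => ?_)
            have hpl : p.1 ≠ label := hnotin p (List.mem_of_mem_filter hp)
            rw [PySem.Dict.getD_insert_of_ne _ _ _ hpl]
          · simp [PySem.Dict.getD_insert_self]
      · rw [getD_set_ne' _ _ _ _ _ hcase, hitems h hlt]
        have hne : hashA label ≠ (h : Int) := by omega
        have hfilter :
            (if since.contains label = true then since
             else since.insert label t).items.filter (fun p => hashA p.1 == (h : Int)) =
            since.items.filter (fun p => hashA p.1 == (h : Int)) := by
          by_cases hc : since.contains label = true
          · simp [hc]
          · simp only [hc, if_neg, Bool.false_eq_true, not_false_iff]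
            rw [PySem.Dict.items_insert_of_not_contains _ _ (by simpa using hc),
              List.filter_append]
            simp [hne]
        rw [hfilter]
        refine (List.map_congr_left (fun p hp => ?_)).symm
        have hph : (hashA p.1 == (h : Int)) = true := (List.mem_filter.mp hp).2
        have hpl : p.1 ≠ label := by
          intro hh; rw [hh] at hph; exact hne (by simpa using hph)
        rw [PySem.Dict.getD_insert_of_ne _ _ _ hpl]
  · -- '-' instruction
    simp only [stepA, stepB, hop, if_neg, Bool.false_eq_true, not_false_iff]
    set label := (pySplit tok "-").getD 0 "" with hlabel
    obtain ⟨hb0, hb1⟩ := hash_bounds label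
    have hblt : (hashA label).toNat < a.length := by omega
    rw [PySem.List.pyGetD_of_nonneg _ _ hb0]
    set dbox := a.getD (hashA label).toNat PySem.Dict.empty with hdb
    have hdmem : dbox ∈ a := by
      rw [hdb, List.getD_eq_getElem _ _ hblt]; exact List.getElem_mem _
    have hitemsb : dbox.items =
        (since.items.filter (fun p => hashA p.1 == hashA label)).map
          (fun p => (p.1, lv.getD p.1 0)) := by
      have := hitems (hashA label).toNat (by omega)
      rwa [Int.toNat_of_nonneg hb0] at this
    have hcont : dbox.contains label = since.contains label :=
      contains_of_items_filter since lv dbox label hitemsb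
    have herase : (since.erase label).items =
        since.items.filter (fun p => !(p.1 == label)) := rfl
    have hsnod : (since.erase label).keys.Nodup := by
      refine List.Nodup.sublist (List.Sublist.map Prod.fst ?_) hnodS
      rw [herase]; exact List.filter_sublist
    have hspw : ((since.erase label).items.map Prod.snd).Pairwise (· < ·) := by
      refine List.Pairwise.sublist (List.Sublist.map Prod.snd ?_) hpw
      rw [herase]; exact List.filter_sublist
    have hsbnd : ∀ p ∈ (since.erase label).items, p.2 < t + 1 := fun p hp =>
      lt_trans (hbnd p (List.mem_of_mem_filter (herase ▸ hp))) (by omega)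
    by_cases hdc : dbox.contains label = true
    · simp only [hdc, if_pos]
      refine ⟨by simp [hlen], ?_, hsnod, hspw, hsbnd, ?_⟩
      · intro d hd
        rcases List.mem_or_eq_of_mem_set hd with h1 | h2
        · exact hnodA d h1
        · subst h2
          refine List.Nodup.sublist (List.Sublist.map Prod.fst ?_) (hnodA _ hdmem)
          exact List.filter_sublist
      · intro h hlt
        have hcomm : (since.items.filter (fun p => !(p.1 == label))).filter
              (fun p => hashA p.1 == hashA label)
            = (since.items.filter (fun p => hashA p.1 == hashA label)).filter
              (fun p => !(p.1 == label)) := by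
          rw [List.filter_filter, List.filter_filter]
          exact List.filter_congr (fun p _ => Bool.and_comm _ _)
        by_cases hcase : h = (hashA label).toNat
        · subst hcase
          rw [getD_set_self' _ _ _ _ hblt, Int.toNat_of_nonneg hb0]
          show (dbox.erase label).items = _
          rw [show (dbox.erase label).items
              = dbox.items.filter (fun p => !(p.1 == label)) from rfl,
            hitemsb, List.filter_map, herase, hcomm]
          simp [Function.comp]
        · rw [getD_set_ne' _ _ _ _ _ hcase, hitems h hlt, herase,
            filter_hash_of_erase _ _ _ (by omega)]
    · have hsc : since.contains label = false := by rw [← hcont]; simpa using hdc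
      have hid : (since.erase label).items = since.items := by
        rw [herase]
        refine List.filter_eq_self.mpr (fun p hp => ?_)
        simpa using fst_ne_of_not_contains since label hsc p hp
      simp only [hdc, if_neg, Bool.false_eq_true, not_false_iff]
      refine ⟨hlen, hnodA, hsnod, hspw, hsbnd, ?_⟩
      intro h hlt
      rw [hitems h hlt, hid]

theorem fold_inv (ts : List String) (a : List (PySem.Dict String Int))
    (lv since : PySem.Dict String Int) (t : Int) (hinv : InvAB a lv since t) :
    InvAB (ts.foldl stepA a)
      ((PySem.List.enumerate ts t).foldl stepB (lv, since)).1
      ((PySem.List.enumerate ts t).foldl stepB (lv, since)).2 (t + ts.length) := by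
  induction ts generalizing a lv since t with
  | nil => simpa using hinv
  | cons x xs ih =>
      rw [PySem.List.enumerate_cons]
      simp only [List.foldl_cons, List.length_cons]
      have := ih _ (stepB (lv, since) (t, x)).1 (stepB (lv, since) (t, x)).2 _
        (step_inv a lv since t x hinv)
      simp only [Prod.mk.eta] at this
      have he : t + ((xs.length + 1 : Nat) : Int) = t + 1 + xs.length := by push_cast; ring
      rw [he]
      exact this

theorem buckets_spec (l : List (String × Int)) (bs : List (List (Int × String)))
    (hlen : bs.length = 256)
    (hh : ∀ p ∈ l, 0 ≤ hashA p.1 ∧ hashA p.1 < 256) :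
    (l.foldl (fun bs p => bs.set (hashB p.1).toNat
        (PySem.List.pyGetD bs (hashB p.1) [] ++ [(p.2, p.1)])) bs).length = 256 ∧
    ∀ h : Nat, h < 256 →
      (l.foldl (fun bs p => bs.set (hashB p.1).toNat
          (PySem.List.pyGetD bs (hashB p.1) [] ++ [(p.2, p.1)])) bs).getD h [] =
        bs.getD h [] ++ (l.filter (fun p => hashA p.1 == (h : Int))).map (fun p => (p.2, p.1)) := by
  induction l generalizing bs with
  | nil => exact ⟨hlen, fun h _ => by simp⟩
  | cons p l ih =>
      obtain ⟨h0, h1⟩ := hh p (by simp)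
      simp only [List.foldl_cons]
      have hset : (bs.set (hashB p.1).toNat
          (PySem.List.pyGetD bs (hashB p.1) [] ++ [(p.2, p.1)])).length = 256 := by
        simp [hlen]
      obtain ⟨hl, hg⟩ := ih _ hset (fun q hq => hh q (by simp [hq]))
      refine ⟨hl, fun h hlt => ?_⟩
      rw [hg h hlt]
      simp only [hashB_eq_hashA] at *
      rw [PySem.List.pyGetD_of_nonneg _ _ h0]
      have hidx : (hashA p.1).toNat < bs.length := by omega
      by_cases hcase : (hashA p.1).toNat = h
      · subst hcase
        have hhb : (hashA p.1 == (((hashA p.1).toNat : Nat) : Int)) = true := by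
          simp; omega
        have hv : ∀ v : List (Int × String),
            (bs.set (hashA p.1).toNat v).getD (hashA p.1).toNat [] = v := fun v => by
          rw [List.getD_eq_getElem _ _ (by simpa using hidx)]
          exact List.getElem_set_self (by simpa using hidx)
        rw [hv]
        simp only [List.filter_cons, Int.toNat_of_nonneg h0, List.map_cons,
          List.append_assoc, List.singleton_append, beq_self_eq_true, if_pos trivial]
      · have hne : hashA p.1 ≠ (h : Int) := by omega
        have hhb : (hashA p.1 == (h : Int)) = false := by simp [hne]
        rw [List.getD_eq_getElem _ _ (by
            rw [List.length_set]; omega : h < (bs.set (hashA p.1).toNat _).length),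
          List.getElem_set_ne (by omega),
          ← List.getD_eq_getElem _ ([] : List (Int × String)) (by omega : h < bs.length)]
        simp [hhb]

theorem enumerate_map {α β : Type} (f : α → β) (l : List α) (s : Int) :
    PySem.List.enumerate (l.map f) s =
      (PySem.List.enumerate l s).map (fun p => (p.1, f p.2)) := by
  induction l generalizing s with
  | nil => rfl
  | cons x xs ih => simp [PySem.List.enumerate_cons, ih]

theorem sum_flatMap_eq {α : Type} (l : List α) (f : α → List Int) :
    (l.flatMap f).sum = (l.map (fun x => (f x).sum)).sum := by
  induction l with
  | nil => rfl
  | cons x xs ih => simp [ih]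

-- ===== VERDICT (by name: the statement is the Claim_ definition above) =====
set_option maxRecDepth 4096 in
set_option maxHeartbeats 1000000 in
theorem part2_spec : Claim_equal_part2 := by
  intro data _ _
  show part2 data = part2_alt data
  simp only [part2, part2_alt, parseA]
  set tokens := pySplit (PySem.Str.replace data "\n" "") ","
  have h256 : (PySem.List.pyRange 0 256 1).length = 256 := by
    rw [show (256 : Int) = ((256 : Nat) : Int) from rfl, PySem.List.pyRange_zero_natCast]
    simp
  have hinit : InvAB ((PySem.List.pyRange 0 256 1).map
      (fun _ => (PySem.Dict.empty : PySem.Dict String Int)))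
      PySem.Dict.empty PySem.Dict.empty 0 := by
    refine ⟨by rw [List.length_map]; exact h256, ?_, PySem.Dict.nodup_keys_empty,
      by simp [PySem.Dict.empty], by simp [PySem.Dict.empty], ?_⟩
    · intro d hd
      rcases List.mem_map.mp hd with ⟨_, _, rfl⟩
      exact PySem.Dict.nodup_keys_empty
    · intro h hlt
      rw [List.getD_eq_getElem _ _ (by rw [List.length_map, h256]; omega), List.getElem_map]
      simp [PySem.Dict.empty]
  have hfold := fold_inv tokens _ PySem.Dict.empty PySem.Dict.empty 0 hinit
  obtain ⟨hlen, hnodA, hnodS, hpw, hbnd, hitems⟩ := hfold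
  set st := (PySem.List.enumerate tokens 0).foldl stepB (PySem.Dict.empty, PySem.Dict.empty) with hst
  set boxesA := tokens.foldl stepA ((PySem.List.pyRange 0 256 1).map
    (fun _ => (PySem.Dict.empty : PySem.Dict String Int))) with hboxes
  obtain ⟨hblen, hbget⟩ := buckets_spec st.2.items
    ((PySem.List.pyRange 0 256 1).map (fun _ => ([] : List (Int × String))))
    (by rw [List.length_map]; exact h256) (fun p _ => hash_bounds p.1)
  set buckets := st.2.items.foldl (fun bs p => bs.set (hashB p.1).toNat
      (PySem.List.pyGetD bs (hashB p.1) [] ++ [(p.2, p.1)]))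
    ((PySem.List.pyRange 0 256 1).map (fun _ => ([] : List (Int × String)))) with hbk
  clear_value tokens st boxesA buckets
  -- turn B's accumulation loops into sums
  simp only [PySem.List.foldl_add, zero_add]
  rw [sum_flatMap_eq]
  refine congrArg List.sum ?_
  apply List.ext_getElem
  · simp [PySem.List.length_enumerate, hlen, hblen]
  intro k hk1 hk2
  rw [List.getElem_map, List.getElem_map, PySem.List.getElem_enumerate, PySem.List.getElem_enumerate]
  have hk : k < 256 := by
    rw [List.length_map, PySem.List.length_enumerate, hlen] at hk1; exact_mod_cast hk1
  have hAk : boxesA[k].items =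
      (st.2.items.filter (fun p => hashA p.1 == (k : Int))).map
        (fun p => (p.1, st.1.getD p.1 0)) := by
    have := hitems k hk
    rwa [List.getD_eq_getElem _ _ (lt_of_lt_of_eq hk hlen.symm)] at this
  have hBk : buckets[k] =
      (st.2.items.filter (fun p => hashA p.1 == (k : Int))).map (fun p => (p.2, p.1)) := by
    have := hbget k hk
    rw [List.getD_eq_getElem _ _ (lt_of_lt_of_eq hk hblen.symm),
      List.getD_eq_getElem _ _ (by rw [List.length_map, h256]; omega), List.getElem_map] at this
    simpa using this
  set filt := st.2.items.filter (fun p => hashA p.1 == (k : Int)) with hfilt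
  have hsorted : PySem.List.sorted (buckets[k]) Prod.fst = buckets[k] := by
    refine PySem.List.sorted_eq_self_of_pairwise _ _ ?_
    rw [hBk]
    have hp2 : (filt.map Prod.snd).Pairwise (· < ·) :=
      List.Pairwise.sublist (List.Sublist.map Prod.snd List.filter_sublist) hpw
    rw [List.pairwise_map] at hp2
    rw [List.pairwise_map]
    exact hp2.imp (fun h => le_of_lt h)
  have hvals : PySem.Dict.values (boxesA[k]) = (boxesA[k]).items.map Prod.snd := rfl
  rw [hsorted, hBk, hvals, hAk, List.map_map, enumerate_map, enumerate_map,
    List.map_map, List.map_map]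
  rfl
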